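-- pv_equiv track=rewrite | github.com/dseum2023/CSE-2050 | Week 6/Natjecanje/Natjecanje.py | kayak_check
-- ===== SOURCE A (Python) =====
-- def kayak_check(damaged, reserves):
--     cant_compete = 0
--
--     damaged_list = damaged.copy()
--     reserves_list = reserves.copy()
--
--     for kayak in reserves_list:
--         if kayak in damaged_list:
--             damaged_list.remove(kayak)
--             reserves.remove(kayak)
--         elif (kayak - 1) in damaged_list:
--             damaged_list.remove(kayak - 1)
--             reserves.remove(kayak)
--         elif (kayak + 1) in damaged_list:
--             damaged_list.remove(kayak + 1)
--             reserves.remove(kayak)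
--
--     cant_compete = len(damaged_list)
--     return cant_compete
-- ===== SOURCE B (Python) =====
-- def kayak_check(damaged, reserves):
--     # Run-length batching: a maximal run of equal reserve sizes is matched in one
--     # arithmetic step (min/subtract on a count table) instead of one scan per kayak;
--     # the answer is the sum of the remaining counts.
--     # Return value only: unlike A, this does not mutate `reserves` in place.
--     cnt = {}
--     for d in damaged:
--         cnt[d] = cnt.get(d, 0) + 1
--     i = 0
--     n = len(reserves)
--     while i < n:
--         k = reserves[i]
--         j = i + 1
--         while j < n and reserves[j] == k:
--             j += 1
--         need = j - i
--         for c in (k, k - 1, k + 1):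
--             have = cnt.get(c, 0)
--             take = need if need < have else have
--             if take:
--                 cnt[c] = have - take
--                 need -= take
--         i = j
--     return sum(cnt.values())
-- ===== Notes on version B (the rewrite author's own statement) =====
-- stated objective: faster
-- what changed: Replaced A's per-kayak greedy over the damaged list (a membership scan plus list.remove per reserve kayak, and a needless reserves.remove) by run-length batching over a count table: the damaged sizes are counted once, each maximal run of equal reserve sizes is matched in a single arithmetic min/subtract step against the counts at k, k-1, k+1, and the answer is the sum of the remaining counts; A also mutates `reserves` in place, B does not (equivalence is about the return value).
import Mathlib
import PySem

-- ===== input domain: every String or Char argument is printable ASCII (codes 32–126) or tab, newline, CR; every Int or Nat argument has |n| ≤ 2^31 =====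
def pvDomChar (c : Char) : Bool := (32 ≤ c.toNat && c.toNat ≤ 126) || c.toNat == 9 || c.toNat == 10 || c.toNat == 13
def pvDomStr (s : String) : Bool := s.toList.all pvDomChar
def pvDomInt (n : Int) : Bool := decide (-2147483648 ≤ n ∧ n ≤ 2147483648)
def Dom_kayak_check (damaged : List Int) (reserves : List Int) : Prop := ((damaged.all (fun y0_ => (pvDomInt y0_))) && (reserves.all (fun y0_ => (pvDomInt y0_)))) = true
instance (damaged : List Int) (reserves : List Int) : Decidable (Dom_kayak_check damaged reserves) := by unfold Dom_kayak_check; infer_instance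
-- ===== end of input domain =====

-- B replaces A's one-scan-per-kayak greedy (membership + list.remove over the damaged list)
-- by run-length batching: a counter of damaged sizes is built once, maximal runs of equal
-- reserve sizes are matched in one arithmetic min/subtract step, and the answer is the sum of
-- the remaining counts — O(n+m) instead of O(n*m).  A also mutates `reserves` in place
-- (reserves.remove); B does not — the equivalence proved here is about the RETURN value.

-- ===== PORT A =====
-- one iteration of A's `for kayak in reserves_list` body, acting on damaged_list
-- (the `reserves.remove(kayak)` calls only mutate the dead argument and do not affect the result)
def kayakStepA (dl : List Int) (k : Int) : List Int :=
  if k ∈ dl then (PySem.List.remove? dl k).getD dl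
  else if (k - 1) ∈ dl then (PySem.List.remove? dl (k - 1)).getD dl
  else if (k + 1) ∈ dl then (PySem.List.remove? dl (k + 1)).getD dl
  else dl

def kayak_check (damaged : List Int) (reserves : List Int) : Int :=
  ((reserves.foldl kayakStepA damaged).length : Int)

-- ===== PORT B =====
-- inner `while j < n and reserves[j] == k` loop: length of the leading run of k, and the rest
def kayakRun (k : Int) : List Int → Nat × List Int
  | [] => (0, [])
  | x :: xs => if x = k then ((kayakRun k xs).1 + 1, (kayakRun k xs).2) else (0, x :: xs)

lemma kayakRun_len_le (k : Int) (xs : List Int) : (kayakRun k xs).2.length ≤ xs.length := by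
  induction xs with
  | nil => simp [kayakRun]
  | cons x xs ih => by_cases h : x = k <;> simp [kayakRun, h]; omega

-- body of `for c in (k, k - 1, k + 1)`: state = (count table, need)
def kayakTake (st : PySem.Dict Int Int × Int) (c : Int) : PySem.Dict Int Int × Int :=
  let hv := st.1.getD c 0
  let tk := if st.2 < hv then st.2 else hv
  if tk ≠ 0 then (st.1.insert c (hv - tk), st.2 - tk) else st

-- outer `while i < n` loop over maximal runs of equal reserve sizes
def kayakRuns (cnt : PySem.Dict Int Int) : List Int → PySem.Dict Int Int
  | [] => cnt
  | k :: rest =>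
      kayakRuns (([k, k - 1, k + 1].foldl kayakTake (cnt, ((kayakRun k rest).1 : Int) + 1)).1)
        (kayakRun k rest).2
termination_by rs => rs.length
decreasing_by
  have := kayakRun_len_le k rest
  simp; omega

def kayak_check_alt (damaged : List Int) (reserves : List Int) : Int :=
  let cnt := damaged.foldl (fun d x => d.insert x (d.getD x 0 + 1)) PySem.Dict.empty
  (kayakRuns cnt reserves).values.sum

-- ===== PRECONDITION & SPEC =====
def Spec_kayak_check (damaged : List Int) (reserves : List Int) (out : Int) : Prop := out = kayak_check_alt damaged reserves
instance (damaged : List Int) (reserves : List Int) (out : Int) : Decidable (Spec_kayak_check damaged reserves out) := by unfold Spec_kayak_check; infer_instance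

-- ===== CLAIM (what is proved, stated in full; the proofs are below) =====
def Claim_equal_kayak_check : Prop := ∀ (damaged : List Int) (reserves : List Int), Dom_kayak_check damaged reserves → Spec_kayak_check damaged reserves (kayak_check damaged reserves)

-- ===== LEMMAS AND PROOFS =====

-- proof-side reference loop: one reserve at a time on a counter (A's greedy on counts)
def kayakStepC (cnt : PySem.Dict Int Int) (k : Int) : PySem.Dict Int Int :=
  if cnt.getD k 0 > 0 then cnt.insert k (cnt.getD k 0 - 1)
  else if cnt.getD (k - 1) 0 > 0 then cnt.insert (k - 1) (cnt.getD (k - 1) 0 - 1)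
  else if cnt.getD (k + 1) 0 > 0 then cnt.insert (k + 1) (cnt.getD (k + 1) 0 - 1)
  else cnt

-- one matched step: A erases v from dl, C decrements cnt at v; count tracking is preserved
lemma kayak_erase_inv (dl : List Int) (cnt : PySem.Dict Int Int) (v : Int)
    (hv : v ∈ dl) (h : ∀ x, cnt.getD x 0 = dl.count x) :
    ∀ x, (cnt.insert v (cnt.getD v 0 - 1)).getD x 0 = (dl.erase v).count x := by
  intro x
  rw [PySem.Dict.getD_insert, List.count_erase]
  have hc : 1 ≤ dl.count v := List.count_pos_iff.mpr hv
  by_cases hx : x = v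
  · subst hx; rw [if_pos rfl, h x]; simp; omega
  · simp [hx, h x, Ne.symm hx]

-- core invariant A <-> C: the counter keeps tracking the multiplicities of A's remaining list
lemma kayak_inv_AC (rs : List Int) : ∀ (dl : List Int) (cnt : PySem.Dict Int Int),
    (∀ x, cnt.getD x 0 = dl.count x) →
    ∀ x, (rs.foldl kayakStepC cnt).getD x 0 = ((rs.foldl kayakStepA dl).count x : Int) := by
  induction rs with
  | nil => intro dl cnt h x; simpa using h x
  | cons k rest ih =>
    intro dl cnt h x
    have hbridge : ∀ v : Int, (cnt.getD v 0 > 0) ↔ v ∈ dl := by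
      intro v; rw [h v]; exact_mod_cast List.count_pos_iff
    simp only [List.foldl_cons]
    by_cases h1 : k ∈ dl
    · have hstepA : kayakStepA dl k = dl.erase k := by
        simp [kayakStepA, h1, PySem.List.remove?_eq_some_erase dl k h1]
      have hstepC : kayakStepC cnt k = cnt.insert k (cnt.getD k 0 - 1) := by
        simp [kayakStepC, (hbridge k).mpr h1]
      rw [hstepA, hstepC]
      exact ih _ _ (kayak_erase_inv dl cnt k h1 h) x
    · by_cases h2 : (k - 1) ∈ dl
      · have hstepA : kayakStepA dl k = dl.erase (k - 1) := by
          simp [kayakStepA, h1, h2, PySem.List.remove?_eq_some_erase dl (k - 1) h2]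
        have hstepC : kayakStepC cnt k = cnt.insert (k - 1) (cnt.getD (k - 1) 0 - 1) := by
          have hk : ¬ cnt.getD k 0 > 0 := fun hc => h1 ((hbridge k).mp hc)
          simp [kayakStepC, hk, (hbridge (k - 1)).mpr h2]
        rw [hstepA, hstepC]
        exact ih _ _ (kayak_erase_inv dl cnt (k - 1) h2 h) x
      · by_cases h3 : (k + 1) ∈ dl
        · have hstepA : kayakStepA dl k = dl.erase (k + 1) := by
            simp [kayakStepA, h1, h2, h3, PySem.List.remove?_eq_some_erase dl (k + 1) h3]
          have hstepC : kayakStepC cnt k = cnt.insert (k + 1) (cnt.getD (k + 1) 0 - 1) := by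
            have hk : ¬ cnt.getD k 0 > 0 := fun hc => h1 ((hbridge k).mp hc)
            have hk1 : ¬ cnt.getD (k - 1) 0 > 0 := fun hc => h2 ((hbridge (k - 1)).mp hc)
            simp [kayakStepC, hk, hk1, (hbridge (k + 1)).mpr h3]
          rw [hstepA, hstepC]
          exact ih _ _ (kayak_erase_inv dl cnt (k + 1) h3 h) x
        · have hstepA : kayakStepA dl k = dl := by simp [kayakStepA, h1, h2, h3]
          have hstepC : kayakStepC cnt k = cnt := by
            have hk : ¬ cnt.getD k 0 > 0 := fun hc => h1 ((hbridge k).mp hc)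
            have hk1 : ¬ cnt.getD (k - 1) 0 > 0 := fun hc => h2 ((hbridge (k - 1)).mp hc)
            have hk2 : ¬ cnt.getD (k + 1) 0 > 0 := fun hc => h3 ((hbridge (k + 1)).mp hc)
            simp [kayakStepC, hk, hk1, hk2]
          rw [hstepA, hstepC]
          exact ih _ _ h x

-- one kayakTake step, read pointwise: it removes min(need, have) at v and nothing else
lemma kayakTake_getD (st : PySem.Dict Int Int × Int) (v x : Int) :
    (kayakTake st v).1.getD x 0
      = if x = v then st.1.getD v 0 - (if st.2 < st.1.getD v 0 then st.2 else st.1.getD v 0)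
        else st.1.getD x 0 := by
  simp only [kayakTake]
  split_ifs with h1 h2 h3 <;> simp_all [PySem.Dict.getD_insert]

lemma kayakTake_need (st : PySem.Dict Int Int × Int) (v : Int) :
    (kayakTake st v).2
      = st.2 - (if st.2 < st.1.getD v 0 then st.2 else st.1.getD v 0) := by
  simp only [kayakTake]
  split_ifs with h1 h2 h3 <;> omega

-- keys / nonnegativity are preserved by one kayakTake step
lemma kayakTake_inv (st : PySem.Dict Int Int × Int) (v : Int)
    (h0 : ∀ x, 0 ≤ st.1.getD x 0) (h1 : 0 ≤ st.2) :
    (kayakTake st v).1.keys = st.1.keys ∧ (∀ x, 0 ≤ (kayakTake st v).1.getD x 0) ∧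
      0 ≤ (kayakTake st v).2 := by
  have hv := h0 v
  have hcont : 0 < st.1.getD v 0 → st.1.contains v = true := by
    intro hp
    by_contra hcc
    have hfalse : st.1.contains v = false := by
      cases hcv : st.1.contains v
      · rfl
      · exact absurd hcv hcc
    have := PySem.Dict.getD_of_not_contains st.1 (0 : Int) hfalse
    omega
  refine ⟨?_, fun x => ?_, ?_⟩
  · simp only [kayakTake]
    split_ifs with h1 h2 h3 <;>
      first
        | rfl
        | exact PySem.Dict.keys_insert_of_contains st.1 _ (hcont (by omega))
  · rw [kayakTake_getD]
    have hx := h0 x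
    split_ifs <;> omega
  · rw [kayakTake_need]
    split_ifs <;> omega

-- pure simulation of a kayakTake fold: state = (count function, need), no dictionaries
def kayakSim : List Int → (Int → Int) → Int → ((Int → Int) × Int)
  | [], f, n => (f, n)
  | v :: cs, f, n =>
      kayakSim cs (fun y => if y = v then f v - (if n < f v then n else f v) else f y)
        (n - (if n < f v then n else f v))

lemma kayakSim_spec (cs : List Int) : ∀ (st : PySem.Dict Int Int × Int),
    (∀ x, (cs.foldl kayakTake st).1.getD x 0
        = (kayakSim cs (fun y => st.1.getD y 0) st.2).1 x)
    ∧ (cs.foldl kayakTake st).2 = (kayakSim cs (fun y => st.1.getD y 0) st.2).2 := by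
  induction cs with
  | nil => intro st; exact ⟨fun x => rfl, rfl⟩
  | cons v cs ih =>
    intro st
    have hf : (fun y => (kayakTake st v).1.getD y 0)
        = (fun y => if y = v then st.1.getD v 0 - (if st.2 < st.1.getD v 0 then st.2 else st.1.getD v 0)
            else st.1.getD y 0) :=
      funext (kayakTake_getD st v)
    have hn := kayakTake_need st v
    simp only [List.foldl_cons, kayakSim]
    constructor
    · intro x
      rw [(ih (kayakTake st v)).1 x, hf, hn]
    · rw [(ih (kayakTake st v)).2, hf, hn]

-- pure one-step greedy on a count function: decrement the first candidate with a positive count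
def kayakStepF (f : Int → Int) : List Int → (Int → Int)
  | [] => f
  | v :: cs => if f v > 0 then (fun y => if y = v then f v - 1 else f y) else kayakStepF f cs

lemma kayakStepF_not_mem (f : Int → Int) (cs : List Int) (v : Int) (hv : v ∉ cs) :
    kayakStepF f cs v = f v := by
  induction cs with
  | nil => rfl
  | cons w cs ih =>
    have hvw : v ≠ w := fun h => hv (h ▸ List.mem_cons_self)
    by_cases hw : f w > 0
    · simp [kayakStepF, hw, hvw]
    · simp only [kayakStepF, if_neg hw]
      exact ih (fun h => hv (List.mem_cons_of_mem w h))

lemma kayakStepC_getD (cnt : PySem.Dict Int Int) (k x : Int) :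
    (kayakStepC cnt k).getD x 0
      = kayakStepF (fun y => cnt.getD y 0) [k, k - 1, k + 1] x := by
  simp only [kayakStepC, kayakStepF]
  split_ifs <;> simp_all [PySem.Dict.getD_insert]

lemma kayakStepF_nonneg (f : Int → Int) (cs : List Int) (hnn : ∀ y, 0 ≤ f y) :
    ∀ x, 0 ≤ kayakStepF f cs x := by
  induction cs with
  | nil => exact hnn
  | cons v cs ih =>
    intro x
    by_cases hv : f v > 0
    · simp only [kayakStepF, if_pos hv]
      have := hnn x
      split_ifs <;> omega
    · simp only [kayakStepF, if_neg hv]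
      exact ih x

lemma kayakStepC_nonneg (cnt : PySem.Dict Int Int) (k : Int)
    (hnn : ∀ x, 0 ≤ cnt.getD x 0) : ∀ x, 0 ≤ (kayakStepC cnt k).getD x 0 := by
  intro x
  rw [kayakStepC_getD]
  exact kayakStepF_nonneg (fun y => cnt.getD y 0) [k, k - 1, k + 1] hnn x

-- pure-level: a batch with need 0 does nothing
lemma kayakSim_zero (cs : List Int) : ∀ (f : Int → Int) (x : Int), (∀ y, 0 ≤ f y) →
    (kayakSim cs f 0).1 x = f x := by
  induction cs with
  | nil => intro f x _; rfl
  | cons v cs ih =>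
    intro f x hnn
    have hv := hnn v
    have ht : (if (0 : Int) < f v then (0 : Int) else f v) = 0 := by split_ifs <;> omega
    have hfeq : (fun y => if y = v then f v else f y) = f := by
      funext y
      by_cases hy : y = v <;> simp [hy]
    simp only [kayakSim, ht, sub_zero, hfeq]
    exact ih f x hnn

-- pure-level: one greedy step commuted out of a batch whose need is one larger
lemma kayakSim_succ (cs : List Int) : ∀ (f : Int → Int) (m x : Int), cs.Nodup →
    0 ≤ m → (∀ y, 0 ≤ f y) →
    (kayakSim cs f (m + 1)).1 x = (kayakSim cs (kayakStepF f cs) m).1 x := by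
  induction cs with
  | nil => intro f m x _ _ _; rfl
  | cons v cs ih =>
    intro f m x hnd hm hnn
    have hv := hnn v
    have hvcs : v ∉ cs := (List.nodup_cons.mp hnd).1
    have hcs : cs.Nodup := (List.nodup_cons.mp hnd).2
    by_cases hpos : f v > 0
    · -- the first candidate is taken on both sides; the resulting states coincide
      have hg : kayakStepF f (v :: cs) = (fun y => if y = v then f v - 1 else f y) := by
        simp [kayakStepF, hpos]
      have hgv : (fun y => if y = v then f v - 1 else f y) v = f v - 1 := by simp
      have ht2 : (if m < f v - 1 then m else f v - 1)
          = (if m + 1 < f v then m + 1 else f v) - 1 := by split_ifs <;> omega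
      have hstate : (fun y => if y = (v : Int) then (fun y => if y = v then f v - 1 else f y) v
            - (if m < (fun y => if y = v then f v - 1 else f y) v then m
                else (fun y => if y = v then f v - 1 else f y) v)
            else (fun y => if y = v then f v - 1 else f y) y)
          = (fun y => if y = v then f v - (if m + 1 < f v then m + 1 else f v) else f y) := by
        funext y
        by_cases hy : y = v <;> simp [hy]; split_ifs <;> omega
      have hneed : m - (if m < (fun y => if y = v then f v - 1 else f y) v then m
            else (fun y => if y = v then f v - 1 else f y) v)
          = m + 1 - (if m + 1 < f v then m + 1 else f v) := by
        split_ifs <;> omega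
      rw [hg]
      conv_rhs => rw [kayakSim, hstate, hneed]
      rfl
    · -- the first candidate has count 0: both sides skip it
      have hv0 : f v = 0 := by omega
      have ht1 : (if m + 1 < f v then m + 1 else f v) = 0 := by split_ifs <;> omega
      have hfeq : (fun y => if y = v then f v - (if m + 1 < f v then m + 1 else f v) else f y)
          = f := by
        funext y
        rw [ht1]
        by_cases hy : y = v <;> simp [hy, hv0]
      have hg : kayakStepF f (v :: cs) = kayakStepF f cs := by simp [kayakStepF, hpos]
      have hg'v : kayakStepF f cs v = 0 := by rw [kayakStepF_not_mem f cs v hvcs, hv0]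
      have ht2 : (if m < kayakStepF f cs v then m else kayakStepF f cs v) = 0 := by
        rw [hg'v]; split_ifs <;> omega
      have hfeq2 : (fun y => if y = v then kayakStepF f cs v
            - (if m < kayakStepF f cs v then m else kayakStepF f cs v)
          else kayakStepF f cs y) = kayakStepF f cs := by
        funext y
        by_cases hy : y = v
        · subst hy; simp [ht2]
        · simp [hy]
      rw [hg]
      conv_lhs => rw [kayakSim, hfeq, ht1, sub_zero]
      conv_rhs => rw [kayakSim, hfeq2, ht2, sub_zero]
      exact ih f m x hcs hm hnn

-- one kayakStepC step commuted out of a batch whose need is one larger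
lemma kayakBatch_succ (cnt : PySem.Dict Int Int) (k : Int)
    (hnn : ∀ x, 0 ≤ cnt.getD x 0) (m : Nat) (x : Int) :
    (([k, k - 1, k + 1].foldl kayakTake (cnt, (m : Int) + 1)).1).getD x 0
      = (([k, k - 1, k + 1].foldl kayakTake (kayakStepC cnt k, (m : Int))).1).getD x 0 := by
  have hm : (0 : Int) ≤ (m : Int) := by positivity
  have hnd : ([k, k - 1, k + 1] : List Int).Nodup := by
    simp
    omega
  rw [(kayakSim_spec [k, k - 1, k + 1] (cnt, (m : Int) + 1)).1 x,
    (kayakSim_spec [k, k - 1, k + 1] (kayakStepC cnt k, (m : Int))).1 x]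
  have hstep : (fun y => (kayakStepC cnt k : PySem.Dict Int Int).getD y 0)
      = kayakStepF (fun y => cnt.getD y 0) [k, k - 1, k + 1] :=
    funext (kayakStepC_getD cnt k)
  rw [hstep]
  exact kayakSim_succ [k, k - 1, k + 1] (fun y => cnt.getD y 0) (m : Int) x hnd hm hnn

-- a batch of need m equals m single C-steps (pointwise on counts)
lemma kayakBatch_eq_replicate (m : Nat) : ∀ (cnt : PySem.Dict Int Int) (k : Int),
    (∀ x, 0 ≤ cnt.getD x 0) → ∀ x,
    (([k, k - 1, k + 1].foldl kayakTake (cnt, (m : Int))).1).getD x 0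
      = ((List.replicate m k).foldl kayakStepC cnt).getD x 0 := by
  induction m with
  | zero =>
    intro cnt k hnn x
    have hb := hnn k; have ha := hnn (k - 1); have hc := hnn (k + 1); have hx := hnn x
    rw [show ((0 : Nat) : Int) = 0 by norm_num,
      (kayakSim_spec [k, k - 1, k + 1] (cnt, (0 : Int))).1 x,
      kayakSim_zero [k, k - 1, k + 1] (fun y => cnt.getD y 0) x hnn]
    simp [List.replicate]
  | succ m ih =>
    intro cnt k hnn x
    have hcast : ((m + 1 : Nat) : Int) = (m : Int) + 1 := by push_cast; ring
    rw [hcast, kayakBatch_succ cnt k hnn m x, List.replicate_succ, List.foldl_cons]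
    exact ih (kayakStepC cnt k) k (kayakStepC_nonneg cnt k hnn) x

lemma kayakRun_decomp (k : Int) (xs : List Int) :
    xs = List.replicate (kayakRun k xs).1 k ++ (kayakRun k xs).2 := by
  induction xs with
  | nil => simp [kayakRun]
  | cons x xs ih =>
      by_cases h : x = k
      · subst h; simpa [kayakRun, List.replicate_succ] using ih
      · simp [kayakRun, h]

-- C-steps are congruent in the pointwise counts
lemma kayakStepC_congr (c1 c2 : PySem.Dict Int Int) (k : Int)
    (h : ∀ x, c1.getD x 0 = c2.getD x 0) :
    ∀ x, (kayakStepC c1 k).getD x 0 = (kayakStepC c2 k).getD x 0 := by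
  intro x
  rw [kayakStepC_getD, kayakStepC_getD]
  have hf : (fun y => c1.getD y 0) = (fun y => c2.getD y 0) := funext h
  rw [hf]

lemma kayakFoldC_congr (rs : List Int) : ∀ (c1 c2 : PySem.Dict Int Int),
    (∀ x, c1.getD x 0 = c2.getD x 0) →
    ∀ x, (rs.foldl kayakStepC c1).getD x 0 = (rs.foldl kayakStepC c2).getD x 0 := by
  induction rs with
  | nil => intro c1 c2 h x; exact h x
  | cons k rest ih =>
    intro c1 c2 h x
    simp only [List.foldl_cons]
    exact ih _ _ (kayakStepC_congr c1 c2 k h) x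

-- three kayakTake steps preserve keys and nonnegativity
lemma kayakBatch_inv (cnt : PySem.Dict Int Int) (k : Int) (need : Int)
    (hnn : ∀ x, 0 ≤ cnt.getD x 0) (hneed : 0 ≤ need) :
    (([k, k - 1, k + 1].foldl kayakTake (cnt, need)).1).keys = cnt.keys ∧
      (∀ x, 0 ≤ (([k, k - 1, k + 1].foldl kayakTake (cnt, need)).1).getD x 0) := by
  have i1 := kayakTake_inv (cnt, need) k hnn hneed
  have i2 := kayakTake_inv (kayakTake (cnt, need) k) (k - 1) i1.2.1 i1.2.2
  have i3 := kayakTake_inv (kayakTake (kayakTake (cnt, need) k) (k - 1)) (k + 1) i2.2.1 i2.2.2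
  simp only [List.foldl_cons, List.foldl_nil]
  exact ⟨by rw [i3.1, i2.1, i1.1], i3.2.1⟩

-- the run loop computes the same counts as the one-reserve-at-a-time loop
lemma kayakRuns_pointwise : ∀ (cnt : PySem.Dict Int Int) (rs : List Int),
    (∀ x, 0 ≤ cnt.getD x 0) →
    ∀ x, (kayakRuns cnt rs).getD x 0 = (rs.foldl kayakStepC cnt).getD x 0 := by
  intro cnt rs
  induction cnt, rs using kayakRuns.induct with
  | case1 cnt => intro _ x; rw [kayakRuns.eq_def]; rfl
  | case2 cnt k rest ih =>
    intro hnn x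
    have hneed : (0 : Int) ≤ ((kayakRun k rest).1 : Int) + 1 := by positivity
    have hB := kayakBatch_inv cnt k (((kayakRun k rest).1 : Int) + 1) hnn hneed
    have hBpt : ∀ y, (([k, k - 1, k + 1].foldl kayakTake
          (cnt, ((kayakRun k rest).1 : Int) + 1)).1).getD y 0
        = ((List.replicate ((kayakRun k rest).1 + 1) k).foldl kayakStepC cnt).getD y 0 := by
      intro y
      have := kayakBatch_eq_replicate ((kayakRun k rest).1 + 1) cnt k hnn y
      rwa [show (((kayakRun k rest).1 + 1 : Nat) : Int) = ((kayakRun k rest).1 : Int) + 1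
        by push_cast; ring] at this
    have hdecomp : k :: rest
        = List.replicate ((kayakRun k rest).1 + 1) k ++ (kayakRun k rest).2 := by
      rw [List.replicate_succ, List.cons_append]
      exact congrArg (k :: ·) (kayakRun_decomp k rest)
    have hunfold : kayakRuns cnt (k :: rest)
        = kayakRuns (([k, k - 1, k + 1].foldl kayakTake
            (cnt, ((kayakRun k rest).1 : Int) + 1)).1) (kayakRun k rest).2 := by
      rw [kayakRuns.eq_def]
    rw [hunfold, hdecomp, List.foldl_append]
    rw [ih hB.2 x]
    exact kayakFoldC_congr (kayakRun k rest).2 _ _ hBpt x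

-- the run loop never adds or removes keys
lemma kayakRuns_keys : ∀ (cnt : PySem.Dict Int Int) (rs : List Int),
    (∀ x, 0 ≤ cnt.getD x 0) → (kayakRuns cnt rs).keys = cnt.keys := by
  intro cnt rs
  induction cnt, rs using kayakRuns.induct with
  | case1 cnt => intro _; rw [kayakRuns.eq_def]
  | case2 cnt k rest ih =>
    intro hnn
    have hneed : (0 : Int) ≤ ((kayakRun k rest).1 : Int) + 1 := by positivity
    have hB := kayakBatch_inv cnt k (((kayakRun k rest).1 : Int) + 1) hnn hneed
    have hunfold : kayakRuns cnt (k :: rest)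
        = kayakRuns (([k, k - 1, k + 1].foldl kayakTake
            (cnt, ((kayakRun k rest).1 : Int) + 1)).1) (kayakRun k rest).2 := by
      rw [kayakRuns.eq_def]
    rw [hunfold, ih hB.2, hB.1]

-- A's loop only removes elements
lemma kayakFoldA_subset (rs : List Int) : ∀ (dl : List Int),
    ∀ x ∈ rs.foldl kayakStepA dl, x ∈ dl := by
  induction rs with
  | nil => intro dl x hx; simpa using hx
  | cons k rest ih =>
    intro dl x hx
    have hstep : ∀ y ∈ kayakStepA dl k, y ∈ dl := by
      intro y hy
      simp only [kayakStepA] at hy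
      split_ifs at hy with h1 h2 h3
      · rw [PySem.List.remove?_eq_some_erase dl k h1] at hy
        exact (dl.erase_subset) hy
      · rw [PySem.List.remove?_eq_some_erase dl (k - 1) h2] at hy
        exact (dl.erase_subset) hy
      · rw [PySem.List.remove?_eq_some_erase dl (k + 1) h3] at hy
        exact (dl.erase_subset) hy
      · exact hy
    exact hstep x (ih (kayakStepA dl k) x (by simpa using hx))

-- summing the counts of l over a duplicate-free key list covering l gives l's length
lemma kayak_sum_count (K : List Int) : ∀ (l : List Int), K.Nodup →
    (∀ x ∈ l, x ∈ K) → (K.map (fun k => (l.count k : Int))).sum = (l.length : Int) := by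
  intro l
  induction l with
  | nil => intro _ _; simp
  | cons a l ih =>
    intro hK hl
    have hmap : (K.map (fun k => ((a :: l).count k : Int)))
        = K.map (fun k => (l.count k : Int) + if a == k then 1 else 0) := by
      apply List.map_congr_left
      intro k _
      rw [List.count_cons]
      by_cases h : a = k
      · subst h; simp
      · simp [h]
    rw [hmap, PySem.List.sum_map_add_int, ih hK (fun x hx => hl x (List.mem_cons_of_mem a hx))]
    have hsum : (K.map (fun k => if a == k then (1 : Int) else 0)).sum
        = K.countP (fun k => a == k) := by
      exact PySem.List.sum_map_ite_one_zero (fun k => a == k) K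
    rw [hsum]
    have hcount : K.countP (fun k => a == k) = K.count a := by
      simp [List.count, BEq.comm]
    rw [hcount, List.count_eq_one_of_mem hK (hl a (List.mem_cons_self))]
    simp

-- ===== VERDICT (by name: the statement is the Claim_ definition above) =====
theorem kayak_check_spec : Claim_equal_kayak_check := by
  intro damaged reserves _
  simp only [Spec_kayak_check, kayak_check, kayak_check_alt]
  rw [PySem.Dict.foldl_insert_getD_add_one_eq_counter]
  have hgd : ∀ x, (PySem.Dict.counter damaged).getD x 0 = (damaged.count x : Int) :=
    fun x => PySem.Dict.getD_counter damaged x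
  have hnn : ∀ x, 0 ≤ (PySem.Dict.counter damaged).getD x 0 := by
    intro x; rw [hgd x]; positivity
  have hpt : ∀ x, (kayakRuns (PySem.Dict.counter damaged) reserves).getD x 0
      = ((reserves.foldl kayakStepA damaged).count x : Int) := by
    intro x
    rw [kayakRuns_pointwise _ _ hnn x]
    exact kayak_inv_AC reserves damaged _ hgd x
  have hkeys : (kayakRuns (PySem.Dict.counter damaged) reserves).keys
      = PySem.Set.ofList damaged := by
    rw [kayakRuns_keys _ _ hnn, PySem.Dict.keys_counter]
  have hnd : (kayakRuns (PySem.Dict.counter damaged) reserves).keys.Nodup := by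
    rw [hkeys]; exact PySem.Set.nodup_ofList damaged
  rw [PySem.Dict.values_eq_map_keys _ hnd 0, hkeys]
  have hmap : (PySem.Set.ofList damaged).map
        (fun k => (kayakRuns (PySem.Dict.counter damaged) reserves).getD k 0)
      = (PySem.Set.ofList damaged).map
        (fun k => ((reserves.foldl kayakStepA damaged).count k : Int)) := by
    apply List.map_congr_left
    intro k _
    exact hpt k
  rw [hmap]
  exact (kayak_sum_count (PySem.Set.ofList damaged) (reserves.foldl kayakStepA damaged)
    (PySem.Set.nodup_ofList damaged)
    (fun x hx => (PySem.Set.mem_ofList damaged x).mpr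
      (kayakFoldA_subset reserves damaged x hx))).symm
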